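-- pv_equiv track=rewrite | github.com/hyuniiya/Algorithm | 프로그래머스/0/120869. 외계어 사전/외계어 사전.py | solution
-- ===== SOURCE A (Python) =====
-- def solution(spell, dic):
--     spell_str = ''.join(sorted(spell))
--
--     for word in dic:
--         word_str = ''.join(sorted(word))
--
--         if len(word) == len(spell) and set(spell).issubset(set(word)):
--             if spell_str == word_str:
--                 return 1
--
--     return 2
-- ===== SOURCE B (Python) =====
-- def _counts(items):
--     c = {}
--     for x in items:
--         c[x] = c.get(x, 0) + 1
--     return c
--
-- def solution(spell, dic):
--     target = _counts(spell)
--     for word in dic: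
--         if _counts(word) == target:
--             return 1
--     return 2
-- ===== Notes on version B (the rewrite author's own statement) =====
-- stated objective: idiomatic
-- what changed: Replaces A's per-word sorted-canonical-string plus length and set-subset checks with a single frequency-table (multiset) equality: build a character-count dict of spell once and compare each word's count dict against it.
import Mathlib
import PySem

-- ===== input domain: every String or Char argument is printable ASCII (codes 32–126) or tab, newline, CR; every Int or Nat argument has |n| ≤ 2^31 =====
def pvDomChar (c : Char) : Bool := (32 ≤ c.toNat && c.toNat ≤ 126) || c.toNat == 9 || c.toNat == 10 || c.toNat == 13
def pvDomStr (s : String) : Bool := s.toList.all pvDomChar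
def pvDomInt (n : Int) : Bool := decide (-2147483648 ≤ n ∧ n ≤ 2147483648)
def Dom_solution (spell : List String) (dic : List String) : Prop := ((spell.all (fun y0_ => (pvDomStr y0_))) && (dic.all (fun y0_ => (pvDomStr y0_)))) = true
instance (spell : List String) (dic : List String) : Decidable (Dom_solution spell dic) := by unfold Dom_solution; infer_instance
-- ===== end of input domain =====

-- B replaces A's per-word sorted-canonical-string + length + set-subset checks by one
-- frequency-table (character-count dict) equality against a table built once from spell.

-- ===== PORT A =====
-- Iterating a Python str yields its 1-char strings: a char c becomes String.ofList [c].
-- ''.join is PySem.Chars.join [] on the toList pieces (exact); sorted is PySem.List.sorted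
-- (Python's str '<' is Lean's '<' on String, and on chars the code-point order).
def solutionLoopA (spell : List String) (spellStr : List Char) (dic : List String) : Int :=
  match dic with
  | [] => 2
  | word :: rest =>
    let wordStr : List Char := PySem.List.sorted word.toList (fun c => c)
    if word.toList.length == spell.length
        && PySem.Set.issubset (PySem.Set.ofList spell)
             (PySem.Set.ofList (word.toList.map (fun c => String.ofList [c]))) then
      if spellStr == wordStr then 1 else solutionLoopA spell spellStr rest
    else solutionLoopA spell spellStr rest

def solution (spell : List String) (dic : List String) : Int :=
  let spellStr : List Char :=
    PySem.Chars.join [] ((PySem.List.sorted spell (fun x => x)).map String.toList)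
  solutionLoopA spell spellStr dic

-- ===== PORT B =====
-- _counts: c = {}; for x in items: c[x] = c.get(x, 0) + 1
def countsB (items : List String) : PySem.Dict String Int :=
  items.foldl (fun c x => c.insert x (c.getD x 0 + 1)) PySem.Dict.empty

-- Python's dict == (order-insensitive: same key set, equal values; counts are never 0 here)
def dictEqB (c t : PySem.Dict String Int) : Bool :=
  c.keys.all (fun k => t.contains k && (t.getD k 0 == c.getD k 0))
    && t.keys.all (fun k => c.contains k)

def solutionLoopB (target : PySem.Dict String Int) (dic : List String) : Int :=
  match dic with
  | [] => 2
  | word :: rest =>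
    if dictEqB (countsB (word.toList.map (fun c => String.ofList [c]))) target then 1
    else solutionLoopB target rest

def solution_alt (spell : List String) (dic : List String) : Int :=
  solutionLoopB (countsB spell) dic

-- ===== PRECONDITION & SPEC =====
def Spec_solution (spell : List String) (dic : List String) (out : Int) : Prop := out = solution_alt spell dic
instance (spell : List String) (dic : List String) (out : Int) : Decidable (Spec_solution spell dic out) := by unfold Spec_solution; infer_instance

-- ===== CLAIM (what is proved, stated in full; the proofs are below) =====
def Claim_equal_solution : Prop := ∀ (spell : List String) (dic : List String), Dom_solution spell dic → Spec_solution spell dic (solution spell dic)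

-- ===== LEMMAS AND PROOFS =====

lemma singChar_lt (a b : Char) : ([a] : List Char) < [b] ↔ a < b := by
  constructor
  · intro h
    rcases h with _ | h
    · assumption
    · simp_all
  · intro h; exact List.Lex.rel h

lemma singChar_le (a b : Char) : ([a] : List Char) ≤ [b] ↔ a ≤ b := by
  rw [← Std.not_lt, ← Std.not_lt (a := b)]
  exact not_congr (singChar_lt b a)

lemma singStr_le (a b : Char) : String.ofList [a] ≤ String.ofList [b] ↔ a ≤ b := by
  rw [String.le_iff_toList_le, String.toList_ofList, String.toList_ofList]
  exact singChar_le a b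

lemma singStr_injective : Function.Injective (fun c => String.ofList [c]) := by
  intro a b h
  have := congrArg String.toList h
  simp [String.toList_ofList] at this
  exact this

-- a list whose members are all singleton strings is the image of its character list
lemma exists_map_sing (xs : List String)
    (h : ∀ x ∈ xs, ∃ c, x = String.ofList [c]) :
    ∃ ds : List Char, xs = ds.map (fun c => String.ofList [c]) := by
  induction xs with
  | nil => exact ⟨[], rfl⟩
  | cons x rest ih =>
    obtain ⟨c, hc⟩ := h x (by simp)
    obtain ⟨ds, hds⟩ := ih (fun y hy => h y (by simp [hy]))
    exact ⟨c :: ds, by simp [hc, hds]⟩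

-- sorting singleton strings is mapping over the sorted characters
lemma sorted_map_sing (ds : List Char) :
    PySem.List.sorted (ds.map (fun c => String.ofList [c])) (fun x => x)
      = (PySem.List.sorted ds (fun c => c)).map (fun c => String.ofList [c]) := by
  apply PySem.List.sorted_id_eq_of_perm_of_pairwise
  · exact ((PySem.List.sorted_perm ds (fun c => c) false).map _)
  · exact (PySem.List.sorted_pairwise ds (fun c => c)).map _
      (fun {a b} hab => (singStr_le a b).mpr hab)

lemma join_sorted_map_sing (ds : List Char) :
    PySem.Chars.join []
        ((PySem.List.sorted (ds.map (fun c => String.ofList [c])) (fun x => x)).map String.toList)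
      = PySem.List.sorted ds (fun c => c) := by
  rw [sorted_map_sing, List.map_map]
  have : (String.toList ∘ fun c => String.ofList [c]) = fun c => [c] := by
    funext c; simp [String.toList_ofList]
  rw [this]
  exact PySem.Chars.join_nil_singletons _

-- A's per-word test holds exactly when word's 1-char strings are a permutation of spell
lemma condA_iff_perm (spell : List String) (word : String) :
    ((word.toList.length == spell.length
        && PySem.Set.issubset (PySem.Set.ofList spell)
             (PySem.Set.ofList (word.toList.map (fun c => String.ofList [c])))) = true
      ∧ PySem.Chars.join [] ((PySem.List.sorted spell (fun x => x)).map String.toList)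
          = PySem.List.sorted word.toList (fun c => c))
    ↔ (word.toList.map (fun c => String.ofList [c])).Perm spell := by
  constructor
  · rintro ⟨hb, hj⟩
    rw [Bool.and_eq_true] at hb
    have hsub : ∀ x ∈ spell, x ∈ word.toList.map (fun c => String.ofList [c]) := by
      intro x hx
      have := (PySem.Set.issubset_iff _ _).mp hb.2 x ((PySem.Set.mem_ofList _ _).mpr hx)
      exact (PySem.Set.mem_ofList _ _).mp this
    obtain ⟨ds, hds⟩ := exists_map_sing spell (by
      intro x hx
      obtain ⟨c, _, hc⟩ := List.mem_map.mp (hsub x hx)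
      exact ⟨c, hc.symm⟩)
    rw [hds, join_sorted_map_sing] at hj
    have hperm : ds.Perm word.toList :=
      (PySem.List.sorted_id_eq_sorted_id_iff_perm ds word.toList).mp hj
    rw [hds]
    exact (hperm.map _).symm
  · intro hp
    have hlen : word.toList.length = spell.length := by
      simpa using hp.length_eq
    have hsing : ∀ x ∈ spell, ∃ c, x = String.ofList [c] := by
      intro x hx
      obtain ⟨c, _, hc⟩ := List.mem_map.mp (hp.mem_iff.mpr hx)
      exact ⟨c, hc.symm⟩
    obtain ⟨ds, hds⟩ := exists_map_sing spell hsing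
    refine ⟨by
      rw [Bool.and_eq_true]
      refine ⟨by simpa using hlen, (PySem.Set.issubset_iff _ _).mpr ?_⟩
      intro x hx
      exact (PySem.Set.mem_ofList _ _).mpr (hp.mem_iff.mpr ((PySem.Set.mem_ofList _ _).mp hx)), ?_⟩
    rw [hds, join_sorted_map_sing]
    have : (ds.map (fun c => String.ofList [c])).Perm
        (word.toList.map (fun c => String.ofList [c])) := by
      rw [← hds]; exact hp.symm
    exact (PySem.List.sorted_id_eq_sorted_id_iff_perm ds word.toList).mpr
      ((List.map_perm_map_iff singStr_injective).mp this)

lemma countsB_eq_counter (l : List String) : countsB l = PySem.Dict.counter l :=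
  PySem.Dict.foldl_insert_getD_add_one_eq_counter l

-- B's per-word test is multiset equality
lemma dictEqB_iff_perm (ys xs : List String) :
    dictEqB (countsB ys) (countsB xs) = true ↔ ys.Perm xs := by
  rw [countsB_eq_counter, countsB_eq_counter]
  unfold dictEqB
  simp only [Bool.and_eq_true, List.all_eq_true, PySem.Dict.keys_counter,
    PySem.Dict.contains_counter, PySem.Dict.getD_counter, PySem.Set.mem_ofList,
    List.contains_eq_mem, beq_iff_eq, decide_eq_true_eq, Nat.cast_inj]
  rw [List.perm_iff_count]
  constructor
  · rintro ⟨h1, h2⟩ v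
    by_cases hv : v ∈ ys
    · exact ((h1 v hv).2).symm
    · rw [List.count_eq_zero_of_not_mem hv, List.count_eq_zero_of_not_mem
        (fun hx => hv (h2 v hx))]
  · intro h
    have hmem : ∀ v, v ∈ ys ↔ v ∈ xs := fun v =>
      (List.perm_iff_count.mpr h).mem_iff
    exact ⟨fun k hk => ⟨(hmem k).mp hk, (h k).symm⟩, fun k hk => (hmem k).mpr hk⟩

lemma loop_eq (spell : List String) (dic : List String) :
    solutionLoopA spell
        (PySem.Chars.join [] ((PySem.List.sorted spell (fun x => x)).map String.toList)) dic
      = solutionLoopB (countsB spell) dic := by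
  induction dic with
  | nil => rfl
  | cons word rest ih =>
    simp only [solutionLoopA, solutionLoopB]
    rcases hd : dictEqB (countsB (word.toList.map (fun c => String.ofList [c])))
        (countsB spell) with _ | _
    · have hnp : ¬ (word.toList.map (fun c => String.ofList [c])).Perm spell := by
        intro hp
        rw [(dictEqB_iff_perm _ _).mpr hp] at hd
        cases hd
      simp only [Bool.false_eq_true, if_false]
      split_ifs with h1 h2
      · exact absurd ((condA_iff_perm spell word).mp ⟨h1, by simpa using h2⟩) hnp
      · exact ih
      · exact ih
    · have hp := (dictEqB_iff_perm (word.toList.map (fun c => String.ofList [c])) spell).mp hd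
      obtain ⟨hb, hj⟩ := (condA_iff_perm spell word).mpr hp
      rw [hb, if_pos rfl, hj]
      simp

-- ===== VERDICT (by name: the statement is the Claim_ definition above) =====
theorem solution_spec : Claim_equal_solution := by
  intro spell dic _
  unfold Spec_solution solution solution_alt
  exact loop_eq spell dic
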